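-- pv_equiv track=rewrite | github.com/sblumenf/podcastknowledge | seeding_pipeline/src/pipeline/feature_integration_framework.py | _find_related_entities
-- ===== SOURCE A (Python) =====
-- from typing import Dict, Any, List, Optional, Tuple
--
-- def _find_related_entities(text: str, entities: List[Dict[str, Any]]) -> List[Dict[str, Any]]:
--     """Find entities mentioned in the given text."""
--     related = []
--     text_lower = text.lower()
--
--     for entity in entities:
--         entity_name = entity.get('name', '').lower()
--         if entity_name and entity_name in text_lower:
--             related.append(entity)
--
--     return related
-- ===== SOURCE B (Python) =====
-- def _find_related_entities(text, entities):
--     """Find entities mentioned in the given text."""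
--     text_lower = text.lower()
--     # Bucket the non-empty lowered entity names by their first character.
--     buckets = {}
--     for entity in entities:
--         name = entity.get('name', '').lower()
--         if name:
--             buckets.setdefault(name[0], []).append(name)
--     # One pass over the text: at each position try only the names that start
--     # with the character found there.
--     found = set()
--     for j, c in enumerate(text_lower):
--         for name in buckets.get(c, []):
--             if text_lower.startswith(name, j):
--                 found.add(name)
--     return [e for e in entities if e.get('name', '').lower() in found]
-- ===== Notes on version B (the rewrite author's own statement) =====
-- stated objective: alternative
-- what changed: Replaces the per-entity substring scan (name in text) by a text-driven multi-pattern search: names are bucketed by first character once, one pass over the text collects the set of matched names, and an order-preserving comprehension filters the entities.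
import Mathlib
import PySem

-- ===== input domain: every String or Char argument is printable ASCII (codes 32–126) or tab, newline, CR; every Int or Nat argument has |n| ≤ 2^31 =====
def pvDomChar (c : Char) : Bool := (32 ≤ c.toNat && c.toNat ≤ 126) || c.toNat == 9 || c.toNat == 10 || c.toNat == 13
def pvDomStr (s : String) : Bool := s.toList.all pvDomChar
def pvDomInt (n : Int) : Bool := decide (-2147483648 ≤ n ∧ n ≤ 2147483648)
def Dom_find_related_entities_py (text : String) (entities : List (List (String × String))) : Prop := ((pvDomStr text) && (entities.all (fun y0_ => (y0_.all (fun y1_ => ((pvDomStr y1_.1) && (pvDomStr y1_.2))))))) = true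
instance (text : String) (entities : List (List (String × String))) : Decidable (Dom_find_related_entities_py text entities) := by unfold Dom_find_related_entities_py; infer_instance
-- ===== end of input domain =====

-- B re-implements the same filter as a text-driven multi-pattern search (bucket names
-- by first character, one pass over the text, then an order-preserving filter); the
-- equivalence below is exact on all inputs (objective: alternative algorithm).

-- ===== PORT A =====
-- entity.get('name', '').lower() — per-entity loop, 'name in text_lower' each time
def find_related_entities_py (text : String) (entities : List (List (String × String))) : List (List (String × String)) :=
  let text_lower := PySem.Str.lower text
  entities.foldl (fun related entity =>
    let entity_name := PySem.Str.lower ((PySem.Dict.mk entity).getD "name" "")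
    if entity_name ≠ "" ∧ PySem.Str.isIn entity_name text_lower then
      related ++ [entity]
    else related) []

-- ===== PORT B =====
-- entity.get('name', '').lower()  (shared subexpression of Source B's three loops)
def pvName (entity : List (String × String)) : String :=
  PySem.Str.lower ((PySem.Dict.mk entity).getD "name" "")

-- buckets: first character ↦ list of lowered non-empty names (setdefault/append loop)
def pvBuckets (entities : List (List (String × String))) : PySem.Dict Char (List String) :=
  entities.foldl (fun b entity =>
    let name := pvName entity
    match name.toList with
    | [] => b
    | c :: _ => b.insert c (b.getD c [] ++ [name])) PySem.Dict.empty

-- found: one pass over the text; text_lower.startswith(name, j) is exact as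
-- name.toList <+: tl.drop j.toNat since enumerate yields 0 ≤ j < len(tl)
def pvFound (tl : List Char) (b : PySem.Dict Char (List String)) : PySem.Set String :=
  (PySem.List.enumerate tl).foldl (fun f jc =>
    (b.getD jc.2 []).foldl (fun f name =>
      if PySem.Chars.startswith (tl.drop jc.1.toNat) name.toList then PySem.Set.add f name
      else f) f) PySem.Set.empty

def find_related_entities_py_alt (text : String) (entities : List (List (String × String))) : List (List (String × String)) :=
  let text_lower := PySem.Str.lower text
  let found := pvFound text_lower.toList (pvBuckets entities)
  entities.filter (fun e => PySem.Set.contains found (pvName e))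

-- ===== PRECONDITION & SPEC =====
def Spec_find_related_entities_py (text : String) (entities : List (List (String × String))) (out : List (List (String × String))) : Prop := out = find_related_entities_py_alt text entities
instance (text : String) (entities : List (List (String × String))) (out : List (List (String × String))) : Decidable (Spec_find_related_entities_py text entities out) := by unfold Spec_find_related_entities_py; infer_instance

-- ===== CLAIM (what is proved, stated in full; the proofs are below) =====
def Claim_equal_find_related_entities_py : Prop := ∀ (text : String) (entities : List (List (String × String))), Dom_find_related_entities_py text entities → Spec_find_related_entities_py text entities (find_related_entities_py text entities)

-- ===== LEMMAS AND PROOFS =====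

-- bucket membership: exactly the non-empty names of the entities, keyed by first character
lemma pv_mem_buckets_foldl (es : List (List (String × String)))
    (b0 : PySem.Dict Char (List String)) (c : Char) (n : String) :
    n ∈ (es.foldl (fun b entity =>
        let name := pvName entity
        match name.toList with
        | [] => b
        | c :: _ => b.insert c (b.getD c [] ++ [name])) b0).getD c [] ↔
      n ∈ b0.getD c [] ∨ ∃ e ∈ es, pvName e = n ∧ n.toList.head? = some c := by
  induction es generalizing b0 with
  | nil => simp
  | cons e es ih =>
    simp only [List.foldl_cons, ih]
    constructor
    · rintro (h | h)
      · cases hn : (pvName e).toList with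
        | nil => simp only [hn] at h; exact Or.inl h
        | cons c' rest =>
          simp only [hn, PySem.Dict.getD_insert] at h
          by_cases hc : c = c'
          · subst hc
            rw [if_pos rfl] at h
            rcases List.mem_append.mp h with h | h
            · exact Or.inl h
            · have hne : n = pvName e := by simpa using h
              exact Or.inr ⟨e, List.mem_cons_self, hne.symm, by simp [hne, hn]⟩
          · rw [if_neg hc] at h; exact Or.inl h
      · rcases h with ⟨e', he', hn, hh⟩
        exact Or.inr ⟨e', List.mem_cons_of_mem _ he', hn, hh⟩
    · rintro (h | ⟨e', he', hn, hh⟩)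
      · left
        cases hn : (pvName e).toList with
        | nil => simpa [hn] using h
        | cons c' rest =>
          simp only [PySem.Dict.getD_insert]
          by_cases hc : c = c'
          · subst hc; rw [if_pos rfl]; exact List.mem_append_left _ h
          · rw [if_neg hc]; exact h
      · rcases List.mem_cons.mp he' with rfl | he''
        · left
          rw [hn]
          cases hn' : n.toList with
          | nil => simp [hn'] at hh
          | cons c' rest =>
            have hcc : c' = c := by rw [hn'] at hh; simpa using hh
            simp only [PySem.Dict.getD_insert]
            rw [if_pos hcc.symm]
            simp
        · exact Or.inr ⟨e', he'', hn, hh⟩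

lemma pv_mem_buckets (entities : List (List (String × String))) (c : Char) (n : String) :
    n ∈ (pvBuckets entities).getD c [] ↔
      ∃ e ∈ entities, pvName e = n ∧ n.toList.head? = some c := by
  unfold pvBuckets
  rw [pv_mem_buckets_foldl]
  simp [PySem.Dict.getD_empty]

-- the inner loop of pvFound: conditional adds into a set
lemma pv_mem_inner (ns : List String) (f0 : PySem.Set String) (P : String → Bool) (x : String) :
    x ∈ ns.foldl (fun f name => if P name then PySem.Set.add f name else f) f0 ↔
      x ∈ f0 ∨ (x ∈ ns ∧ P x = true) := by
  induction ns generalizing f0 with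
  | nil => simp
  | cons n ns ih =>
    simp only [List.foldl_cons, ih]
    by_cases h : P n
    · simp only [if_pos h, PySem.Set.mem_add]
      constructor
      · rintro ((hf | rfl) | h2)
        · exact Or.inl hf
        · exact Or.inr ⟨List.mem_cons_self, h⟩
        · exact Or.inr ⟨List.mem_cons_of_mem _ h2.1, h2.2⟩
      · rintro (hf | ⟨hm, hp⟩)
        · exact Or.inl (Or.inl hf)
        · rcases List.mem_cons.mp hm with rfl | hm
          · exact Or.inl (Or.inr rfl)
          · exact Or.inr ⟨hm, hp⟩
    · simp only [if_neg h]
      constructor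
      · rintro (hf | h2)
        · exact Or.inl hf
        · exact Or.inr ⟨List.mem_cons_of_mem _ h2.1, h2.2⟩
      · rintro (hf | ⟨hm, hp⟩)
        · exact Or.inl hf
        · rcases List.mem_cons.mp hm with rfl | hm
          · exact absurd hp (by simp [h])
          · exact Or.inr ⟨hm, hp⟩

lemma pv_mem_found_foldl (tl : List Char) (b : PySem.Dict Char (List String))
    (l : List (Int × Char)) (f0 : PySem.Set String) (x : String) :
    x ∈ l.foldl (fun f jc =>
        (b.getD jc.2 []).foldl (fun f name =>
          if PySem.Chars.startswith (tl.drop jc.1.toNat) name.toList then PySem.Set.add f name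
          else f) f) f0 ↔
      x ∈ f0 ∨ ∃ jc ∈ l, x ∈ b.getD jc.2 [] ∧
        PySem.Chars.startswith (tl.drop jc.1.toNat) x.toList = true := by
  induction l generalizing f0 with
  | nil => simp
  | cons jc l ih =>
    simp only [List.foldl_cons, ih, pv_mem_inner]
    constructor
    · rintro ((hf | ⟨hm, hp⟩) | ⟨jc', hjc', h⟩)
      · exact Or.inl hf
      · exact Or.inr ⟨jc, List.mem_cons_self, hm, hp⟩
      · exact Or.inr ⟨jc', List.mem_cons_of_mem _ hjc', h⟩
    · rintro (hf | ⟨jc', hjc', hm, hp⟩)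
      · exact Or.inl (Or.inl hf)
      · rcases List.mem_cons.mp hjc' with rfl | hjc'
        · exact Or.inl (Or.inr ⟨hm, hp⟩)
        · exact Or.inr ⟨jc', hjc', hm, hp⟩

-- the key characterisation: for a name of one of the entities, membership in 'found'
-- is exactly "non-empty and a substring of the lowered text"
lemma pv_mem_found (text : String) (entities : List (List (String × String))) (n : String)
    (hn : ∃ e ∈ entities, pvName e = n) :
    n ∈ pvFound (PySem.Str.lower text).toList (pvBuckets entities) ↔
      (n ≠ "" ∧ PySem.Str.isIn n (PySem.Str.lower text) = true) := by
  unfold pvFound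
  rw [pv_mem_found_foldl]
  simp only [PySem.Set.empty, List.not_mem_nil, false_or]
  constructor
  · rintro ⟨jc, hjc, hmem, hpre⟩
    rw [pv_mem_buckets] at hmem
    rcases hmem with ⟨e, _, _, hhead⟩
    have hne : n ≠ "" := by
      intro h; subst h; simp at hhead
    refine ⟨hne, ?_⟩
    rw [PySem.Str.isIn_eq, PySem.Str.toList_lower, ← PySem.Chars.exists_prefix_drop_iff_isIn]
    refine ⟨jc.1.toNat, ?_⟩
    have := (PySem.Chars.startswith_iff _ _).mp hpre
    rwa [PySem.Str.toList_lower] at this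
  · rintro ⟨hne, hin⟩
    rw [PySem.Str.isIn_eq, ← PySem.Chars.exists_prefix_drop_iff_isIn] at hin
    rcases hin with ⟨j, hpre⟩
    cases hn' : n.toList with
    | nil => exact absurd (by apply String.ext; simpa using hn') hne
    | cons c rest =>
      -- the dropped suffix starts with c, so j < len and the j-th character is c
      rw [hn'] at hpre
      rcases hpre with ⟨t, ht⟩
      have hdrop : ((PySem.Str.lower text).toList).drop j = c :: (rest ++ t) := by
        rw [← ht]; simp
      have hjlt : j < (PySem.Str.lower text).toList.length := by
        by_contra hge
        rw [List.drop_eq_nil_of_le (le_of_not_gt hge)] at hdrop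
        simp at hdrop
      have hget : (PySem.Str.lower text).toList[j] = c := by
        have h0 : (((PySem.Str.lower text).toList).drop j)[0]? = some c := by rw [hdrop]; rfl
        rw [List.getElem?_drop, Nat.add_zero] at h0
        exact Option.some_injective _ ((List.getElem?_eq_getElem hjlt).symm.trans h0)
      refine ⟨((j : Int), c), ?_, ?_, ?_⟩
      · rw [PySem.List.mem_enumerate_iff]
        refine ⟨j, hjlt, ?_⟩
        rw [hget]
        simp
      · rw [pv_mem_buckets]
        rcases hn with ⟨e, he, hname⟩
        exact ⟨e, he, hname, by simp [hn']⟩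
      · rw [PySem.Chars.startswith_iff]
        simp only [Int.toNat_natCast]
        rw [hdrop]
        simp

-- ===== VERDICT (by name: the statement is the Claim_ definition above) =====
theorem find_related_entities_py_spec : Claim_equal_find_related_entities_py := by
  intro text entities _
  unfold Spec_find_related_entities_py find_related_entities_py find_related_entities_py_alt
  simp only []
  rw [PySem.List.foldl_congr_mem
      (g := fun related entity =>
        if PySem.Set.contains (pvFound (PySem.Str.lower text).toList (pvBuckets entities)) (pvName entity) = true then
          related ++ [entity]
        else related)]
  · rw [PySem.List.foldl_append_ite_eq_filter]
    simp
  · intro acc e he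
    have hiff := pv_mem_found text entities (pvName e) ⟨e, he, rfl⟩
    show (if pvName e ≠ "" ∧ PySem.Str.isIn (pvName e) (PySem.Str.lower text) = true then
            acc ++ [e] else acc) =
         (if PySem.Set.contains (pvFound (PySem.Str.lower text).toList (pvBuckets entities))
              (pvName e) = true then acc ++ [e] else acc)
    by_cases h : pvName e ≠ "" ∧ PySem.Str.isIn (pvName e) (PySem.Str.lower text) = true
    · rw [if_pos h, if_pos]
      rw [PySem.Set.contains_iff]
      exact hiff.mpr h
    · rw [if_neg h, if_neg]
      intro hc
      exact h (hiff.mp ((PySem.Set.contains_iff _ _).mp hc))
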